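-- pv_equiv track=rewrite | github.com/Spokoziomek123/Wyznaczanie-pierwiastk-w-wymiernych-wielomianu | program.py | find_prawa
-- ===== SOURCE A (Python) =====
-- def find_prawa(a):
--     s=""
--     for i in range(len(a)-1,-1,-1):
--         if a[i]=="+" or a[i]=="-":
--             break
--         else:
--             s+=a[i]
--     return s[::-1]
-- ===== SOURCE B (Python) =====
-- def find_prawa(a):
--     # single left-to-right pass: keep the run of characters since the last sign,
--     # resetting the buffer whenever a '+' or '-' is seen (no reversal needed)
--     s = ""
--     for ch in a:
--         s = "" if ch == "+" or ch == "-" else s + ch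
--     return s
-- ===== Notes on version B (the rewrite author's own statement) =====
-- stated objective: simpler
-- what changed: Replaces the right-to-left index-based accumulate-until-sign loop with string reversal by a single left-to-right pass that resets the buffer at each sign, so no reversal, no indexing and no break are needed.
import Mathlib
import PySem

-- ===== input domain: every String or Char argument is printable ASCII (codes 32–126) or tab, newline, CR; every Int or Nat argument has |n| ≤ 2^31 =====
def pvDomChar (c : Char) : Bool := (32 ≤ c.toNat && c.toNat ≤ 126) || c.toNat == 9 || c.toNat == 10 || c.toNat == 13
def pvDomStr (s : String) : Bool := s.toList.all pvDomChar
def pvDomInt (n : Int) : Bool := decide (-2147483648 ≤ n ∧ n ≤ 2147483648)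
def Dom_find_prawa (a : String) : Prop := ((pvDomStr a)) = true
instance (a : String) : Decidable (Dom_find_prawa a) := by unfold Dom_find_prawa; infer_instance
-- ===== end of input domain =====

-- B replaces A's right-to-left accumulate-until-sign loop (plus string reversal) by a single
-- left-to-right pass that resets the buffer at each sign: simpler, no reversal, no break.


-- ===== PORT A =====
-- loop of A: walks indices len-1 .. 0, breaking at the first '+' or '-'
def loopA (l : List Char) : List Int → List Char → List Char
  | [], s => s
  | i :: rest, s =>
    match PySem.List.pyGet? l i with
    | none => s
    | some c => if c == '+' || c == '-' then s else loopA l rest (s ++ [c])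

def find_prawa (a : String) : String :=
  let l := a.toList
  let s := loopA l (PySem.List.pyRange ((l.length : Int) - 1) (-1) (-1)) []
  -- s[::-1]
  String.ofList ((PySem.List.slice? s none none (-1)).getD [])

-- ===== PORT B =====
def find_prawa_alt (a : String) : String :=
  String.ofList (a.toList.foldl (fun s c => if c == '+' || c == '-' then [] else s ++ [c]) [])

-- ===== PRECONDITION & SPEC =====
def Spec_find_prawa (a : String) (out : String) : Prop := out = find_prawa_alt a
instance (a : String) (out : String) : Decidable (Spec_find_prawa a out) := by unfold Spec_find_prawa; infer_instance

-- ===== CLAIM (what is proved, stated in full; the proofs are below) =====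
def Claim_equal_find_prawa : Prop := ∀ (a : String), Dom_find_prawa a → Spec_find_prawa a (find_prawa a)

-- ===== LEMMAS AND PROOFS =====
-- the common characterisation: the run of non-sign characters at the end, reversed prefix form
def pvKeep (c : Char) : Bool := !(c == '+' || c == '-')

lemma loopA_spec (l : List Char) : ∀ (k : Nat) (s : List Char), k ≤ l.length →
    loopA l (PySem.List.pyRange ((k : Int) - 1) (-1) (-1)) s
      = s ++ (l.take k).reverse.takeWhile pvKeep := by
  intro k
  induction k with
  | zero =>
    intro s _
    rw [show ((0 : Nat) : Int) - 1 = (-1 : Int) by norm_num,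
        PySem.List.pyRange_neg_one_eq_nil le_rfl]
    simp [loopA]
  | succ k ih =>
    intro s hk
    have hkl : k < l.length := by omega
    rw [show ((k + 1 : Nat) : Int) - 1 = (k : Int) by push_cast; ring,
        PySem.List.pyRange_neg_one_cons (show (-1:Int) < (k:Int) by omega)]
    have hget : PySem.List.pyGet? l ((k:Int)) = some l[k] := by
      simp [PySem.List.pyGet?, PySem.List.pyIdx?, hkl]
    have htake : (l.take (k+1)).reverse = l[k] :: (l.take k).reverse := by
      rw [List.take_add_one]
      simp [hkl]
    rw [htake]
    by_cases hc : (l[k] == '+' || l[k] == '-') = true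
    · simp [loopA, hget, hc, List.takeWhile, pvKeep]
    · simp [loopA, hget, hc, ih (s ++ [l[k]]) (by omega : k ≤ l.length),
        List.takeWhile, pvKeep]

def pvStep (s : List Char) (c : Char) : List Char := if c == '+' || c == '-' then [] else s ++ [c]

lemma foldl_spec (l : List Char) : ∀ (s : List Char),
    l.foldl pvStep s
      = if (∃ c ∈ l, pvKeep c = false) then (l.reverse.takeWhile pvKeep).reverse
        else s ++ l := by
  induction l using List.reverseRecOn with
  | nil => intro s; simp
  | append_singleton l c ih =>
    intro s
    rw [List.foldl_append]
    simp only [List.foldl_cons, List.foldl_nil]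
    by_cases hc : (c == '+' || c == '-') = true
    · have hkeep : pvKeep c = false := by simp [pvKeep, hc]
      rw [if_pos ⟨c, by simp, hkeep⟩]
      simp [pvStep, hc, hkeep]
    · have hkeep : pvKeep c = true := by simpa [pvKeep] using hc
      rw [ih s]
      by_cases hl : ∃ x ∈ l, pvKeep x = false
      · obtain ⟨x, hx, hxf⟩ := hl
        rw [if_pos ⟨x, hx, hxf⟩, if_pos ⟨x, by simp [hx], hxf⟩]
        simp [pvStep, hc, hkeep]
      · rw [if_neg hl, if_neg (by
          rintro ⟨x, hx, hxf⟩
          rcases List.mem_append.mp hx with h | h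
          · exact hl ⟨x, h, hxf⟩
          · simp at h; subst h; rw [hkeep] at hxf; simp at hxf)]
        simp [pvStep, hc]

-- ===== VERDICT (by name: the statement is the Claim_ definition above) =====
theorem find_prawa_spec : Claim_equal_find_prawa := by
  intro a _
  unfold Spec_find_prawa find_prawa find_prawa_alt
  simp only [PySem.List.slice?_none_none_neg_one, Option.getD_some]
  rw [loopA_spec a.toList a.toList.length [] le_rfl]
  rw [show (a.toList.foldl (fun s c => if c == '+' || c == '-' then [] else s ++ [c]) [])
        = a.toList.foldl pvStep [] from rfl]
  rw [foldl_spec a.toList []]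
  simp only [List.take_length, List.nil_append]
  by_cases hl : ∃ x ∈ a.toList, pvKeep x = false
  · rw [if_pos hl]
  · rw [if_neg hl]
    have : a.toList.reverse.takeWhile pvKeep = a.toList.reverse := by
      apply List.takeWhile_eq_self_iff.mpr
      intro x hx
      rcases Bool.eq_false_or_eq_true (pvKeep x) with h | h
      · exact h
      · exact absurd ⟨x, List.mem_reverse.mp hx, h⟩ hl
    simp [this]
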